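-- pv_equiv track=rewrite | github.com/Jazpy/toy-phaser | src/haplotypes.py | __segsites
-- ===== SOURCE A (Python) =====
-- def __segsites(g):
--   ret = []
--   first = True
--
--   for i, snp in enumerate(g):
--     if snp[0] != snp[1]:
--       if first:
--         first = False
--       else:
--         ret.append(i)
--
--   return ret
-- ===== SOURCE B (Python) =====
-- def __segsites(g):
--   # stage 1: locate the first heterozygous site (early exit)
--   j = next((k for k, snp in enumerate(g) if snp[0] != snp[1]), None)
--   if j is None:
--     return []
--   # stage 2: scan only the tail after it, re-indexing by the offset
--   return [j + 1 + k for k, snp in enumerate(g[j + 1:]) if snp[0] != snp[1]]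
-- ===== Notes on version B (the rewrite author's own statement) =====
-- stated objective: alternative
-- what changed: Replaces A's single stateful first-flag scan with a two-stage algorithm: an early-exit search for the index of the first heterozygous site, then a separate scan of only the tail slice after it with offset re-indexing.
import Mathlib
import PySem

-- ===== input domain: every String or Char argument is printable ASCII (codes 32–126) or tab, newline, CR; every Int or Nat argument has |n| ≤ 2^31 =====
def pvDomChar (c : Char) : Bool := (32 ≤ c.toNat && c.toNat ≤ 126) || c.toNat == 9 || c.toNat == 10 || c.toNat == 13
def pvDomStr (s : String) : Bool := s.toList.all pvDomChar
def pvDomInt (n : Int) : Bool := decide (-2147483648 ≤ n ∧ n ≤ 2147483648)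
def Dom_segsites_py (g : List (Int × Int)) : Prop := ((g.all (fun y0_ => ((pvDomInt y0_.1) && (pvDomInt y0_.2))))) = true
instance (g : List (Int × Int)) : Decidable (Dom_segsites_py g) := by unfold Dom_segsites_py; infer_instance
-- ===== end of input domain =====

-- B replaces A's stateful first-flag scan by a two-stage algorithm: find the first
-- heterozygous index, then scan only the tail slice after it; objective: alternative.


-- ===== PORT A =====
-- transliteration of A's loop: state (ret, first), iterated over enumerate(g)
def segsites_py (g : List (Int × Int)) : List Int :=
  ((PySem.List.enumerate g).foldl
    (fun (st : List Int × Bool) p =>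
      if p.2.1 ≠ p.2.2 then
        if st.2 then (st.1, false) else (st.1 ++ [p.1], st.2)
      else st)
    ([], true)).1

-- ===== PORT B =====
-- stage 1: next((k for k, snp in enumerate(g) if snp[0] != snp[1]), None)
def pvFirstHet : List (Int × Int) → Int → Option Int
  | [], _ => none
  | p :: t, k => if p.1 ≠ p.2 then some k else pvFirstHet t (k + 1)

-- stage 2: [j + 1 + k for k, snp in enumerate(g[j+1:]) if snp[0] != snp[1]]
def segsites_py_alt (g : List (Int × Int)) : List Int :=
  match pvFirstHet g 0 with
  | none => []
  | some j =>
      ((PySem.List.enumerate (PySem.List.slice g (some (j + 1)) none)).filter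
        (fun p => p.2.1 != p.2.2)).map (fun p => j + 1 + p.1)

-- ===== PRECONDITION & SPEC =====
def Spec_segsites_py (g : List (Int × Int)) (out : List Int) : Prop := out = segsites_py_alt g
instance (g : List (Int × Int)) (out : List Int) : Decidable (Spec_segsites_py g out) := by unfold Spec_segsites_py; infer_instance

-- ===== CLAIM (what is proved, stated in full; the proofs are below) =====
def Claim_equal_segsites_py : Prop := ∀ (g : List (Int × Int)), Dom_segsites_py g → Spec_segsites_py g (segsites_py g)

-- ===== LEMMAS AND PROOFS =====
def pvStep : (List Int × Bool) → (Int × (Int × Int)) → (List Int × Bool) :=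
  fun st p =>
    if p.2.1 ≠ p.2.2 then
      if st.2 then (st.1, false) else (st.1 ++ [p.1], st.2)
    else st

-- heterozygous indices of xs, enumerated from s
def pvHetIdx (xs : List (Int × Int)) (s : Int) : List Int :=
  ((PySem.List.enumerate xs s).filter (fun p => p.2.1 != p.2.2)).map (fun p => p.1)

theorem pvLoop_false (l : List (Int × (Int × Int))) (acc : List Int) :
    (l.foldl pvStep (acc, false)).1
      = acc ++ ((l.filter (fun p => p.2.1 != p.2.2)).map (fun p => p.1)) := by
  induction l generalizing acc with
  | nil => simp
  | cons p l ih =>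
    by_cases h : p.2.1 = p.2.2
    · rw [List.filter_cons_of_neg (by simp [h])]; simp [pvStep, h, ih]
    · rw [List.filter_cons_of_pos (by simp [h])]; simp [pvStep, h, ih]

theorem pvLoop_true (l : List (Int × (Int × Int))) :
    (l.foldl pvStep ([], true)).1
      = (((l.filter (fun p => p.2.1 != p.2.2)).map (fun p => p.1)).drop 1) := by
  induction l with
  | nil => simp
  | cons p l ih =>
    by_cases h : p.2.1 = p.2.2
    · rw [List.filter_cons_of_neg (by simp [h])]; simpa [pvStep, h] using ih
    · rw [List.filter_cons_of_pos (by simp [h])]; simp [pvStep, h, pvLoop_false]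

-- A's result is: drop the head of the heterozygous-index list
theorem pvA_eq (g : List (Int × Int)) : segsites_py g = (pvHetIdx g 0).drop 1 :=
  pvLoop_true (PySem.List.enumerate g)

theorem pvEnum_shift (xs : List (Int × Int)) (s : Int) :
    PySem.List.enumerate xs (1 + s)
      = (PySem.List.enumerate xs s).map (fun p => (1 + p.1, p.2)) := by
  induction xs generalizing s with
  | nil => simp [PySem.List.enumerate]
  | cons x t ih =>
    rw [PySem.List.enumerate_cons, PySem.List.enumerate_cons,
      show (1 + s + 1 : Int) = 1 + (s + 1) by ring, ih (s + 1)]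
    simp

theorem pvHetIdx_shift (xs : List (Int × Int)) (s : Int) :
    pvHetIdx xs (1 + s) = (pvHetIdx xs s).map (fun i => 1 + i) := by
  unfold pvHetIdx
  rw [pvEnum_shift, List.filter_map, List.map_map]
  simp [Function.comp_def]

theorem pvFirstHet_shift (xs : List (Int × Int)) (s : Int) :
    pvFirstHet xs (1 + s) = (pvFirstHet xs s).map (fun i => 1 + i) := by
  induction xs generalizing s with
  | nil => simp [pvFirstHet]
  | cons x t ih =>
    by_cases h : x.1 = x.2
    · simpa [pvFirstHet, h, add_assoc] using ih (s + 1)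
    · simp [pvFirstHet, h]

theorem pvFirstHet_le (xs : List (Int × Int)) (s j : Int)
    (h : pvFirstHet xs s = some j) : s ≤ j := by
  induction xs generalizing s with
  | nil => simp [pvFirstHet] at h
  | cons x t ih =>
    by_cases hx : x.1 = x.2
    · simp [pvFirstHet, hx] at h; have := ih (s + 1) h; omega
    · simp [pvFirstHet, hx] at h; omega

-- B's result is also: drop the head of the heterozygous-index list
theorem pvB_eq (g : List (Int × Int)) : segsites_py_alt g = (pvHetIdx g 0).drop 1 := by
  induction g with
  | nil => rfl
  | cons x t ih =>
    by_cases hx : x.1 = x.2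
    · -- homozygous head
      have hshift : pvFirstHet t 1 = (pvFirstHet t 0).map (fun i => 1 + i) := by
        simpa using pvFirstHet_shift t 0
      have hHet : pvHetIdx (x :: t) 0 = pvHetIdx t 1 := by
        unfold pvHetIdx
        rw [PySem.List.enumerate_cons, List.filter_cons_of_neg (by simp [hx])]
        norm_num
      rw [hHet, show (1 : Int) = 1 + 0 by ring, pvHetIdx_shift, ← List.map_drop, ← ih]
      unfold segsites_py_alt
      rw [show pvFirstHet (x :: t) 0 = pvFirstHet t 1 by simp [pvFirstHet, hx], hshift]
      cases hft : pvFirstHet t 0 with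
      | none => simp
      | some j =>
        have hj : 0 ≤ j := pvFirstHet_le t 0 j hft
        simp only [Option.map_some]
        have hsl : PySem.List.slice (x :: t) (some (1 + j + 1)) none
            = PySem.List.slice t (some (j + 1)) none := by
          rw [PySem.List.slice_from _ (show (0:Int) ≤ 1 + j + 1 by omega),
            PySem.List.slice_from _ (show (0:Int) ≤ j + 1 by omega)]
          have : (1 + j + 1).toNat = (j + 1).toNat + 1 := by omega
          rw [this, List.drop_succ_cons]
        rw [hsl, List.map_map]
        apply List.map_congr_left
        intro a _
        simp; ring
    · -- heterozygous head
      have hHet : pvHetIdx (x :: t) 0 = 0 :: pvHetIdx t 1 := by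
        unfold pvHetIdx
        rw [PySem.List.enumerate_cons, List.filter_cons_of_pos (by simp [hx])]
        norm_num
      rw [hHet]
      unfold segsites_py_alt
      rw [show pvFirstHet (x :: t) 0 = some 0 by simp [pvFirstHet, hx]]
      have hsl : PySem.List.slice (x :: t) (some ((0:Int) + 1)) none = t := by
        rw [PySem.List.slice_from _ (show (0:Int) ≤ 0 + 1 by omega)]; rfl
      simp only [hsl]
      rw [List.drop_one, List.tail_cons,
        show (1 : Int) = 1 + 0 by ring, pvHetIdx_shift]
      unfold pvHetIdx
      rw [List.map_map]
      apply List.map_congr_left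
      intro a _
      simp

-- ===== VERDICT (by name: the statement is the Claim_ definition above) =====
theorem segsites_py_spec : Claim_equal_segsites_py := by
  intro g _
  show segsites_py g = segsites_py_alt g
  rw [pvA_eq, pvB_eq]
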